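-- pv_equiv track=rewrite | github.com/charlielockyer-rice/bscs-bench-public | comp140/reference_solutions/module2_solution.py | generate_all_points
-- ===== SOURCE A (Python) =====
-- def equivalent(point1, point2, mod):
--     """
--     Determines if two points are equivalent in projective space over Z_mod.
--
--     Two points are equivalent if one is a scalar multiple of the other.
--     We use the cross product to test this: if p x q = [0, 0, 0] (mod m),
--     then there is no unique line through them, meaning they are the same point.
--
--     Cross product formula:
--     p x q = [p_y*q_z - p_z*q_y, p_z*q_x - p_x*q_z, p_x*q_y - p_y*q_x]
--
--     inputs:
--         - point1: a tuple of 3 integers representing the first point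
--         - point2: a tuple of 3 integers representing the second point
--         - mod: an integer representing the modulus (should be prime)
--
--     returns: a boolean indicating whether the points are equivalent
--     """
--     p_x, p_y, p_z = point1
--     q_x, q_y, q_z = point2
--
--     # Compute cross product components
--     cross_a = (p_y * q_z - p_z * q_y) % mod
--     cross_b = (p_z * q_x - p_x * q_z) % mod
--     cross_c = (p_x * q_y - p_y * q_x) % mod
--
--     # Points are equivalent if cross product is [0, 0, 0]
--     return cross_a == 0 and cross_b == 0 and cross_c == 0
--
-- def generate_all_points(mod):
--     """
--     Generate all unique points in the projective plane over Z_mod.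
--
--     Algorithm:
--     1. Generate all possible triples (x, y, z) where x, y, z in {0, 1, ..., mod-1}
--     2. Exclude (0, 0, 0) as it's not a valid point
--     3. For each triple, check if it's equivalent to any already-collected point
--     4. If not equivalent to any existing point, add it to our collection
--
--     For prime p, the result should have exactly p^2 + p + 1 points.
--
--     inputs:
--         - mod: an integer representing the modulus (should be prime)
--
--     returns: a list of unique points, each is a tuple of 3 integers
--     """
--     points = []
--
--     # Iterate through all possible triples
--     for x in range(mod):
--         for y in range(mod):
--             for z in range(mod):
--                 # Skip the invalid point (0, 0, 0)
--                 if x == 0 and y == 0 and z == 0: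
--                     continue
--
--                 candidate = (x, y, z)
--
--                 # Check if this candidate is equivalent to any existing point
--                 is_unique = True
--                 for existing_point in points:
--                     if equivalent(candidate, existing_point, mod):
--                         is_unique = False
--                         break
--
--                 # If unique, add to our collection
--                 if is_unique:
--                     points.append(candidate)
--
--     return points
-- ===== SOURCE B (Python) =====
-- def generate_all_points(mod):
--     """Collect one representative per projective point over Z_mod.
--
--     Instead of testing each candidate against every already-kept point,
--     maintain a 'covered' set: whenever a point is kept, mark every triple
--     whose cross product with it vanishes mod `mod`; a candidate is new
--     exactly when it has not been marked.
--     """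
--     points = []
--     covered = set()
--     for x in range(mod):
--         for y in range(mod):
--             for z in range(mod):
--                 if x == 0 and y == 0 and z == 0:
--                     continue
--                 candidate = (x, y, z)
--                 if candidate in covered:
--                     continue
--                 points.append(candidate)
--                 for qx in range(mod):
--                     for qy in range(mod):
--                         for qz in range(mod):
--                             if ((y * qz - z * qy) % mod == 0
--                                     and (z * qx - x * qz) % mod == 0
--                                     and (x * qy - y * qx) % mod == 0):
--                                 covered.add((qx, qy, qz))
--     return points
-- ===== Notes on version B (the rewrite author's own statement) =====
-- stated objective: alternative
-- what changed: Instead of testing each candidate triple against every already-kept point with the cross-product test, B maintains a 'covered' set: whenever a point is kept it marks all triples whose cross product with it vanishes, so each candidate needs a single set-membership test instead of a scan of the kept list.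
import Mathlib
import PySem

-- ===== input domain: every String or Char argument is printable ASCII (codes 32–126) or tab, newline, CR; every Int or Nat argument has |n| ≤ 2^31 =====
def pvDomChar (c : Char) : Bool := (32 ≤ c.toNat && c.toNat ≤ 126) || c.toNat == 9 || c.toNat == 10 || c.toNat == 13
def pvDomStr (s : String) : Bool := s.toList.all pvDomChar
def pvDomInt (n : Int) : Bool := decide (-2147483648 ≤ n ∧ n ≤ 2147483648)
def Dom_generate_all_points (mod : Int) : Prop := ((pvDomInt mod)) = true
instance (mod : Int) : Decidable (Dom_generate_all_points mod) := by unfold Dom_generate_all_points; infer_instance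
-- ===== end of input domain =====

-- B replaces A's per-candidate scan of the kept list by a 'covered' set that is
-- extended with every cross-zero triple whenever a point is kept (objective: alternative).

-- ===== PORT A =====
-- helper 'equivalent' of A; only ever applied to 3-element lists (the catch-all is unreachable)
def pyEquivalent (point1 point2 : List Int) (mod : Int) : Bool :=
  match point1, point2 with
  | [px, py, pz], [qx, qy, qz] =>
      PySem.Int.mod (py * qz - pz * qy) mod == 0 &&
      PySem.Int.mod (pz * qx - px * qz) mod == 0 &&
      PySem.Int.mod (px * qy - py * qx) mod == 0
  | _, _ => false

-- A's inner 'for existing_point in points: … break' loop with the is_unique flag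
def pyIsUnique (candidate : List Int) (mod : Int) : List (List Int) → Bool
  | [] => true
  | p :: rest => if pyEquivalent candidate p mod then false else pyIsUnique candidate mod rest

def generate_all_points (mod : Int) : List (List Int) :=
  (PySem.List.pyRange 0 mod).foldl (fun points x =>
    (PySem.List.pyRange 0 mod).foldl (fun points y =>
      (PySem.List.pyRange 0 mod).foldl (fun points z =>
        if x == 0 && y == 0 && z == 0 then points
        else if pyIsUnique [x, y, z] mod points then points ++ [[x, y, z]]
        else points) points) points) []

-- ===== PORT B =====
-- Source B's marking loop: add every triple whose cross product with (x,y,z) vanishes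
def markCovered (x y z mod : Int) (covered : PySem.Set (List Int)) : PySem.Set (List Int) :=
  (PySem.List.pyRange 0 mod).foldl (fun cov qx =>
    (PySem.List.pyRange 0 mod).foldl (fun cov qy =>
      (PySem.List.pyRange 0 mod).foldl (fun cov qz =>
        if PySem.Int.mod (y * qz - z * qy) mod == 0 &&
           PySem.Int.mod (z * qx - x * qz) mod == 0 &&
           PySem.Int.mod (x * qy - y * qx) mod == 0
        then PySem.Set.add cov [qx, qy, qz] else cov) cov) cov) covered

def generate_all_points_alt (mod : Int) : List (List Int) :=
  ((PySem.List.pyRange 0 mod).foldl (fun st x =>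
    (PySem.List.pyRange 0 mod).foldl (fun st y =>
      (PySem.List.pyRange 0 mod).foldl (fun st z =>
        if x == 0 && y == 0 && z == 0 then st
        else if PySem.Set.contains st.2 [x, y, z] then st
        else (st.1 ++ [[x, y, z]], markCovered x y z mod st.2)) st) st)
    (([] : List (List Int)), (PySem.Set.empty : PySem.Set (List Int)))).1

-- ===== PRECONDITION & SPEC =====
def Spec_generate_all_points (mod : Int) (out : List (List Int)) : Prop := out = generate_all_points_alt mod
instance (mod : Int) (out : List (List Int)) : Decidable (Spec_generate_all_points mod out) := by unfold Spec_generate_all_points; infer_instance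

-- ===== CLAIM (what is proved, stated in full; the proofs are below) =====
def Claim_equal_generate_all_points : Prop := ∀ (mod : Int), Dom_generate_all_points mod → Spec_generate_all_points mod (generate_all_points mod)

-- ===== LEMMAS AND PROOFS =====

-- all candidate triples, in A's (and Source B's) enumeration order
def pvCube (m : Int) : List (Int × Int × Int) :=
  (PySem.List.pyRange 0 m).flatMap (fun x =>
    (PySem.List.pyRange 0 m).flatMap (fun y =>
      (PySem.List.pyRange 0 m).map (fun z => (x, y, z))))

lemma pvCube_foldl {σ : Type} (m : Int) (g : σ → Int → Int → Int → σ) (s : σ) :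
    (pvCube m).foldl (fun s t => g s t.1 t.2.1 t.2.2) s
      = (PySem.List.pyRange 0 m).foldl (fun s x =>
          (PySem.List.pyRange 0 m).foldl (fun s y =>
            (PySem.List.pyRange 0 m).foldl (fun s z => g s x y z) s) s) s := by
  simp [pvCube, List.foldl_flatMap, List.foldl_map]

-- the flattened loop bodies
def pvStepA (m : Int) (points : List (List Int)) (t : Int × Int × Int) : List (List Int) :=
  if t.1 == 0 && t.2.1 == 0 && t.2.2 == 0 then points
  else if pyIsUnique [t.1, t.2.1, t.2.2] m points then points ++ [[t.1, t.2.1, t.2.2]]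
  else points

def pvStepB (m : Int) (st : List (List Int) × PySem.Set (List Int)) (t : Int × Int × Int) :
    List (List Int) × PySem.Set (List Int) :=
  if t.1 == 0 && t.2.1 == 0 && t.2.2 == 0 then st
  else if PySem.Set.contains st.2 [t.1, t.2.1, t.2.2] then st
  else (st.1 ++ [[t.1, t.2.1, t.2.2]], markCovered t.1 t.2.1 t.2.2 m st.2)

lemma genA_eq (m : Int) : generate_all_points m = (pvCube m).foldl (pvStepA m) [] := by
  exact (pvCube_foldl m (fun (pts : List (List Int)) x y z =>
    if x == 0 && y == 0 && z == 0 then pts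
    else if pyIsUnique [x, y, z] m pts then pts ++ [[x, y, z]] else pts) []).symm

lemma genB_eq (m : Int) :
    generate_all_points_alt m = ((pvCube m).foldl (pvStepB m) ([], PySem.Set.empty)).1 := by
  exact congrArg Prod.fst (pvCube_foldl m (fun (st : List (List Int) × PySem.Set (List Int)) x y z =>
    if x == 0 && y == 0 && z == 0 then st
    else if PySem.Set.contains st.2 [x, y, z] then st
    else (st.1 ++ [[x, y, z]], markCovered x y z m st.2)) ([], PySem.Set.empty)).symm

lemma mark_eq (x y z m : Int) (cov : PySem.Set (List Int)) :
    markCovered x y z m cov = (pvCube m).foldl (fun cov t =>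
      if pyEquivalent [x, y, z] [t.1, t.2.1, t.2.2] m then PySem.Set.add cov [t.1, t.2.1, t.2.2] else cov) cov := by
  exact (pvCube_foldl m (fun (cov : PySem.Set (List Int)) qx qy qz =>
    if PySem.Int.mod (y * qz - z * qy) m == 0 &&
       PySem.Int.mod (z * qx - x * qz) m == 0 &&
       PySem.Int.mod (x * qy - y * qx) m == 0
    then PySem.Set.add cov [qx, qy, qz] else cov) cov).symm

lemma pvDvd_neg_of (m x y : Int) (hxy : x + y = 0) (h : m ∣ x) : m ∣ y := by
  have hy : y = -x := by omega
  rw [hy]; exact (dvd_neg).mpr h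

lemma pvModZero_flip (m u v : Int) (huv : u + v = 0) :
    (PySem.Int.mod u m == 0) = (PySem.Int.mod v m == 0) := by
  have h : (PySem.Int.mod u m = 0) ↔ (PySem.Int.mod v m = 0) := by
    rw [PySem.Int.mod_eq_zero_iff_dvd, PySem.Int.mod_eq_zero_iff_dvd]
    exact ⟨fun h => pvDvd_neg_of m u v huv h, fun h => pvDvd_neg_of m v u (by omega) h⟩
  apply Bool.eq_iff_iff.mpr
  simpa using h

lemma pyEquivalent_comm (m : Int) (p q : List Int) :
    pyEquivalent p q m = pyEquivalent q p m := by
  rcases p with _ | ⟨a, _ | ⟨b, _ | ⟨c, _ | ⟨a', p⟩⟩⟩⟩ <;>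
    rcases q with _ | ⟨d, _ | ⟨e, _ | ⟨f, _ | ⟨d', q⟩⟩⟩⟩ <;>
      simp only [pyEquivalent]
  rw [pvModZero_flip m (b * f - c * e) (e * c - f * b) (by ring),
      pvModZero_flip m (c * d - a * f) (f * a - d * c) (by ring),
      pvModZero_flip m (a * e - b * d) (d * b - e * a) (by ring)]

lemma pyEquivalent_symm (m : Int) (p q : List Int) :
    (pyEquivalent p q m = true) ↔ (pyEquivalent q p m = true) := by
  rw [pyEquivalent_comm]

lemma pyIsUnique_false_iff (c : List Int) (m : Int) (pts : List (List Int)) :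
    pyIsUnique c m pts = false ↔ ∃ p ∈ pts, pyEquivalent c p m = true := by
  induction pts with
  | nil => simp [pyIsUnique]
  | cons p rest ih =>
    by_cases h : pyEquivalent c p m = true
    · simp [pyIsUnique, h]
    · simp [pyIsUnique, h, ih]

lemma mem_foldl_add (L : List (Int × Int × Int)) (c : Int × Int × Int → Bool)
    (cov : PySem.Set (List Int)) (q : List Int) :
    (q ∈ L.foldl (fun cov t => if c t then PySem.Set.add cov [t.1, t.2.1, t.2.2] else cov) cov)
      ↔ q ∈ cov ∨ ∃ t ∈ L, c t = true ∧ q = [t.1, t.2.1, t.2.2] := by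
  induction L generalizing cov with
  | nil => simp
  | cons t L ih =>
    simp only [List.foldl_cons]
    by_cases h : c t = true
    · rw [if_pos h, ih]
      simp only [PySem.Set.mem_add, List.mem_cons]
      constructor
      · rintro ((hq | hq) | ⟨u, hu, hcu, hq⟩)
        · exact Or.inl hq
        · exact Or.inr ⟨t, Or.inl rfl, h, hq⟩
        · exact Or.inr ⟨u, Or.inr hu, hcu, hq⟩
      · rintro (hq | ⟨u, (rfl | hu), hcu, hq⟩)
        · exact Or.inl (Or.inl hq)
        · exact Or.inl (Or.inr hq)
        · exact Or.inr ⟨u, hu, hcu, hq⟩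
    · rw [if_neg h, ih]
      constructor
      · rintro (hq | ⟨u, hu, hcu, hq⟩)
        · exact Or.inl hq
        · exact Or.inr ⟨u, List.mem_cons_of_mem _ hu, hcu, hq⟩
      · rintro (hq | ⟨u, hu, hcu, hq⟩)
        · exact Or.inl hq
        · rcases List.mem_cons.mp hu with rfl | hu
          · exact absurd hcu h
          · exact Or.inr ⟨u, hu, hcu, hq⟩

-- the loop invariant: 'covered' holds exactly the enumerated triples cross-zero with a kept point
def pvCovInv (m : Int) (pts : List (List Int)) (cov : PySem.Set (List Int)) : Prop :=
  ∀ q : List Int, q ∈ cov ↔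
    ∃ t ∈ pvCube m, q = [t.1, t.2.1, t.2.2] ∧ ∃ p ∈ pts, pyEquivalent p q m = true

lemma pvMain (m : Int) (L : List (Int × Int × Int)) (hL : ∀ t ∈ L, t ∈ pvCube m) :
    ∀ (pts : List (List Int)) (cov : PySem.Set (List Int)), pvCovInv m pts cov →
      (L.foldl (pvStepB m) (pts, cov)).1 = L.foldl (pvStepA m) pts ∧
      pvCovInv m (L.foldl (pvStepA m) pts) (L.foldl (pvStepB m) (pts, cov)).2 := by
  induction L with
  | nil => exact fun pts cov hinv => ⟨rfl, hinv⟩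
  | cons t L ih =>
    intro pts cov hinv
    have ht : t ∈ pvCube m := hL t List.mem_cons_self
    have hL' : ∀ u ∈ L, u ∈ pvCube m := fun u hu => hL u (List.mem_cons_of_mem _ hu)
    simp only [List.foldl_cons]
    cases h0 : (t.1 == 0 && t.2.1 == 0 && t.2.2 == 0) with
    | true =>
      have hA : pvStepA m pts t = pts := by simp [pvStepA, h0]
      have hB : pvStepB m (pts, cov) t = (pts, cov) := by simp [pvStepB, h0]
      rw [hA, hB]
      exact ih hL' pts cov hinv
    | false =>
      have key : PySem.Set.contains cov [t.1, t.2.1, t.2.2] = true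
          ↔ pyIsUnique [t.1, t.2.1, t.2.2] m pts = false := by
        rw [PySem.Set.contains_iff, hinv, pyIsUnique_false_iff]
        constructor
        · rintro ⟨u, _, hq, p, hp, he⟩
          exact ⟨p, hp, (pyEquivalent_symm m _ _).mpr he⟩
        · rintro ⟨p, hp, he⟩
          exact ⟨t, ht, rfl, p, hp, (pyEquivalent_symm m _ _).mp he⟩
      cases hc : PySem.Set.contains cov [t.1, t.2.1, t.2.2] with
      | true =>
        have hu : pyIsUnique [t.1, t.2.1, t.2.2] m pts = false := key.mp hc
        have hA : pvStepA m pts t = pts := by simp [pvStepA, h0, hu]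
        have hm : [t.1, t.2.1, t.2.2] ∈ cov := (PySem.Set.contains_iff _ _).mp hc
        have hB : pvStepB m (pts, cov) t = (pts, cov) := by simp [pvStepB, h0, hm]
        rw [hA, hB]
        exact ih hL' pts cov hinv
      | false =>
        have hu : pyIsUnique [t.1, t.2.1, t.2.2] m pts = true := by
          cases hq : pyIsUnique [t.1, t.2.1, t.2.2] m pts with
          | true => rfl
          | false => rw [← key] at hq; rw [hq] at hc; exact absurd hc (by simp)
        have hA : pvStepA m pts t = pts ++ [[t.1, t.2.1, t.2.2]] := by simp [pvStepA, h0, hu]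
        have hB : pvStepB m (pts, cov) t
            = (pts ++ [[t.1, t.2.1, t.2.2]], markCovered t.1 t.2.1 t.2.2 m cov) := by
          have hm : [t.1, t.2.1, t.2.2] ∉ cov := by
            intro hm; rw [← PySem.Set.contains_iff, hc] at hm; exact absurd hm (by simp)
          simp [pvStepB, h0, hm]
        rw [hA, hB]
        apply ih hL'
        intro q
        rw [mark_eq, mem_foldl_add, hinv]
        constructor
        · rintro (⟨u, hu', hq, p, hp, he⟩ | ⟨u, hu', hcu, hq⟩)
          · exact ⟨u, hu', hq, p, List.mem_append_left _ hp, he⟩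
          · refine ⟨u, hu', hq, [t.1, t.2.1, t.2.2],
              List.mem_append_right _ (List.mem_singleton.mpr rfl), ?_⟩
            rw [hq]; exact hcu
        · rintro ⟨u, hu', hq, p, hp, he⟩
          rcases List.mem_append.mp hp with hp | hp
          · exact Or.inl ⟨u, hu', hq, p, hp, he⟩
          · rcases List.mem_singleton.mp hp with rfl
            exact Or.inr ⟨u, hu', by rw [← hq]; exact he, hq⟩

-- ===== VERDICT (by name: the statement is the Claim_ definition above) =====
theorem generate_all_points_spec : Claim_equal_generate_all_points := by
  intro m _
  show generate_all_points m = generate_all_points_alt m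
  have hinv0 : pvCovInv m [] PySem.Set.empty := by
    intro q; simp [PySem.Set.empty]
  have h := pvMain m (pvCube m) (fun t ht => ht) [] PySem.Set.empty hinv0
  rw [genA_eq, genB_eq]
  exact h.1.symm
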